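-- pv_equiv track=rewrite | github.com/jdarov/PY_120 | Lesson2/Inheritance/exam_question.py | list_of_consecutive_ints
-- ===== SOURCE A (Python) =====
-- def list_of_consecutive_ints(list_of_ints):
--
--     list_of_c_ints = list()
--
--     for x in range(len(list_of_ints)):
--         repeated_ints = set()
--         c_ints = list()
--         for y in range(x, len(list_of_ints)):
--             if list_of_ints[y] in repeated_ints:
--                 break
--             repeated_ints.add(list_of_ints[y])
--             c_ints.append(list_of_ints[y])
--         list_of_c_ints.append(c_ints)
--
--
--     return list_of_c_ints
-- ===== SOURCE B (Python) =====
-- def list_of_consecutive_ints(list_of_ints):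
--     # Right-to-left DP: the distinct run starting at x is the element at x
--     # followed by the run starting at x+1, cut at the first reoccurrence of that element.
--     runs = []
--     prev = []
--     for a in reversed(list_of_ints):
--         if a in prev:
--             prev = [a] + prev[:prev.index(a)]
--         else:
--             prev = [a] + prev
--         runs.append(prev)
--     runs.reverse()
--     return runs
-- ===== Notes on version B (the rewrite author's own statement) =====
-- stated objective: alternative
-- what changed: Replaces A's fresh nested scan (a new set and inner loop for every start index) by a single right-to-left pass that derives each run from the already-computed run of the next suffix, cutting it at the first reoccurrence of the new head element.
import Mathlib
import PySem

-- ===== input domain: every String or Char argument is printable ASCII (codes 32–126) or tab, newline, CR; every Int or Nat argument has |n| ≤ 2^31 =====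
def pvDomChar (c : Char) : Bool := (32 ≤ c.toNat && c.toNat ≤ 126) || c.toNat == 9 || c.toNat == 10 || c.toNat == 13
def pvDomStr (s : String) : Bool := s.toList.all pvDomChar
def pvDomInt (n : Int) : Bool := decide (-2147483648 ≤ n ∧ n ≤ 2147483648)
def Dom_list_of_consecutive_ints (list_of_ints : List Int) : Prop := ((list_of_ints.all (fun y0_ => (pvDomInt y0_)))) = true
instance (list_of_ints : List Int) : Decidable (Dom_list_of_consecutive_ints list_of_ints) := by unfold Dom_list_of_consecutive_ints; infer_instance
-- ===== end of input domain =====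

-- B replaces A's fresh nested scan per start index by a single right-to-left pass that
-- derives each run from the run of the next suffix (alternative decomposition, same cost).

-- ===== PORT A =====
-- inner loop body: state = (repeated_ints, c_ints, broken); 'break' is modelled by the
-- broken flag that freezes the state for the rest of the range.
def pvAStep (list_of_ints : List Int) (st : PySem.Set Int × List Int × Bool) (y : Int) :
    PySem.Set Int × List Int × Bool :=
  if st.2.2 then st
  else match PySem.List.pyGet? list_of_ints y with
    | none => st  -- unreachable: y ∈ range(x, len(list_of_ints))
    | some v =>
      if PySem.Set.contains st.1 v then (st.1, st.2.1, true)
      else (PySem.Set.add st.1 v, st.2.1 ++ [v], false)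

def list_of_consecutive_ints (list_of_ints : List Int) : List (List Int) :=
  (PySem.List.pyRange 0 (list_of_ints.length : Int) 1).foldl
    (fun list_of_c_ints x =>
      list_of_c_ints ++
        [((PySem.List.pyRange x (list_of_ints.length : Int) 1).foldl
            (pvAStep list_of_ints) (PySem.Set.empty, [], false)).2.1])
    []

-- ===== PORT B =====
-- loop body of Source B: state = (runs, prev)
def pvBStep (st : List (List Int) × List Int) (a : Int) : List (List Int) × List Int :=
  let prev := st.2
  let cur :=
    if prev.contains a then
      a :: (match PySem.List.index? prev a with
            | some i => PySem.List.slice prev none (some (i : Int))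
            | none => prev)  -- unreachable: guarded by 'a in prev'
    else a :: prev
  (st.1 ++ [cur], cur)

def list_of_consecutive_ints_alt (list_of_ints : List Int) : List (List Int) :=
  let st := list_of_ints.reverse.foldl pvBStep ([], [])
  st.1.reverse

-- ===== PRECONDITION & SPEC =====
def Spec_list_of_consecutive_ints (list_of_ints : List Int) (out : List (List Int)) : Prop := out = list_of_consecutive_ints_alt list_of_ints
instance (list_of_ints : List Int) (out : List (List Int)) : Decidable (Spec_list_of_consecutive_ints list_of_ints out) := by unfold Spec_list_of_consecutive_ints; infer_instance

-- ===== CLAIM (what is proved, stated in full; the proofs are below) =====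
def Claim_equal_list_of_consecutive_ints : Prop := ∀ (list_of_ints : List Int), Dom_list_of_consecutive_ints list_of_ints → Spec_list_of_consecutive_ints list_of_ints (list_of_consecutive_ints list_of_ints)

-- ===== LEMMAS AND PROOFS =====

-- the distinct-prefix function both programs compute, with an explicit 'seen' accumulator
def pvDT (seen : List Int) : List Int → List Int
  | [] => []
  | a :: t => if seen.contains a then [] else a :: pvDT (a :: seen) t

def pvSpecList (l : List Int) : List (List Int) :=
  (List.range l.length).map (fun k => pvDT [] (l.drop k))

theorem pvDT_congr (seen₁ seen₂ : List Int)
    (h : ∀ v : Int, v ∈ seen₁ ↔ v ∈ seen₂) :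
    ∀ l, pvDT seen₁ l = pvDT seen₂ l := by
  intro l
  induction l generalizing seen₁ seen₂ with
  | nil => rfl
  | cons a t ih =>
    by_cases hv : a ∈ seen₂
    · have hv1 : a ∈ seen₁ := (h a).2 hv
      simp [pvDT, hv, hv1]
    · have hv1 : a ∉ seen₁ := fun hh => hv ((h a).1 hh)
      simp only [pvDT]
      rw [if_neg (by simpa using hv1), if_neg (by simpa using hv)]
      refine congrArg _ (ih _ _ ?_)
      intro v
      simp only [List.mem_cons]
      exact or_congr Iff.rfl (h v)

theorem pvDT_cons_seen (a : Int) (seen t : List Int) :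
    pvDT (a :: seen) t = (pvDT seen t).takeWhile (fun b => !(b == a)) := by
  induction t generalizing seen with
  | nil => rfl
  | cons b t ih =>
    by_cases hb : b ∈ seen
    · simp [pvDT, hb]
    · by_cases hba : b = a
      · subst hba
        simp [pvDT, hb]
      · have h1 : b ∉ (a :: seen) := by simp [hba, hb]
        simp only [pvDT]
        rw [if_neg (by simpa using h1), if_neg (by simpa using hb)]
        have hpred : (!(b == a)) = true := by simp [hba]
        simp only [List.takeWhile_cons, hpred, if_true]
        refine congrArg _ ?_
        rw [← ih (b :: seen)]
        refine pvDT_congr _ _ ?_ t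
        intro v
        simp only [List.mem_cons]
        tauto

-- prefix before the first occurrence: take (index) = takeWhile (≠ a)
theorem pv_take_pre (a : Int) (pre suf : List Int) (hpre : a ∉ pre) :
    (pre ++ a :: suf).takeWhile (fun b => !(b == a)) = pre := by
  induction pre with
  | nil => simp
  | cons p ps ih =>
    have hpa : (p == a) = false := by
      simp only [beq_eq_false_iff_ne]; intro h; exact hpre (by simp [h])
    simp only [List.cons_append, List.takeWhile, hpa, Bool.not_false]
    exact congrArg _ (ih (fun h => hpre (by simp [h])))

-- ===== A's side =====

theorem pvA_frozen (l : List Int) (ys : List Int) (s : PySem.Set Int) (c : List Int) :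
    ys.foldl (pvAStep l) (s, c, true) = (s, c, true) := by
  induction ys with
  | nil => rfl
  | cons y ys ih => simpa [pvAStep] using ih

theorem pvA_inner (l : List Int) (d : Nat) :
    ∀ (y : Nat) (seen acc : List Int), l.length - y = d →
    ((PySem.List.pyRange (y : Int) (l.length : Int) 1).foldl (pvAStep l)
      (seen, acc, false)).2.1 = acc ++ pvDT seen (l.drop y) := by
  induction d with
  | zero =>
    intro y seen acc hy
    have hge : l.length ≤ y := by omega
    rw [PySem.List.pyRange_one_eq_nil (by exact_mod_cast hge)]
    simp [List.drop_eq_nil_of_le hge, pvDT]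
  | succ d ih =>
    intro y seen acc hy
    have hlt : y < l.length := by omega
    rw [PySem.List.pyRange_one_cons (by exact_mod_cast hlt)]
    have hget : PySem.List.pyGet? l (y : Int) = some (l[y]'hlt) := by
      simp [List.getElem?_eq_getElem hlt]
    have hdrop : l.drop y = l[y]'hlt :: l.drop (y + 1) :=
      (List.getElem_cons_drop hlt).symm
    simp only [List.foldl_cons]
    by_cases hc : l[y]'hlt ∈ seen
    · have hstep : pvAStep l (seen, acc, false) (y : Int) = (seen, acc, true) := by
        simp [pvAStep, hget, PySem.Set.contains, hc]
      rw [hstep, pvA_frozen, hdrop]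
      simp [pvDT, hc]
    · have hstep : pvAStep l (seen, acc, false) (y : Int)
          = (seen ++ [l[y]'hlt], acc ++ [l[y]'hlt], false) := by
        simp [pvAStep, hget, PySem.Set.contains, PySem.Set.add, hc]
      rw [hstep]
      have hcast : (y : Int) + 1 = ((y + 1 : Nat) : Int) := by push_cast; ring
      rw [hcast, ih (y + 1) (seen ++ [l[y]'hlt]) (acc ++ [l[y]'hlt]) (by omega)]
      rw [hdrop]
      simp only [pvDT]
      rw [if_neg (by simpa using hc)]
      simp only [List.append_assoc, List.singleton_append]
      refine congrArg _ (congrArg _ ?_)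
      refine pvDT_congr _ _ ?_ _
      intro v
      simp only [List.mem_append, List.mem_cons]
      tauto

theorem pvA_eq_spec (l : List Int) : list_of_consecutive_ints l = pvSpecList l := by
  unfold list_of_consecutive_ints pvSpecList
  rw [PySem.List.pyRange_zero_nat]
  have key : ∀ (R : List Nat) (acc : List (List Int)),
      (R.map (fun (k : Nat) => (k : Int))).foldl
        (fun list_of_c_ints x =>
          list_of_c_ints ++
            [((PySem.List.pyRange x (l.length : Int) 1).foldl
                (pvAStep l) (PySem.Set.empty, [], false)).2.1]) acc
      = acc ++ R.map (fun k => pvDT [] (l.drop k)) := by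
    intro R
    induction R with
    | nil => intro acc; simp
    | cons k R ih =>
      intro acc
      rw [List.map_cons, List.foldl_cons, List.map_cons, ih]
      have hin : ((PySem.List.pyRange (k : Int) (l.length : Int) 1).foldl
          (pvAStep l) (PySem.Set.empty, [], false)).2.1 = pvDT [] (l.drop k) := by
        have := pvA_inner l (l.length - k) k [] [] rfl
        simpa [PySem.Set.empty] using this
      rw [hin, List.append_assoc, List.singleton_append]
  rw [key (List.range l.length) []]
  simp

-- ===== B's side =====

theorem pvB_cur (a : Int) (prev : List Int) :
    (if prev.contains a then
      a :: (match PySem.List.index? prev a with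
            | some i => PySem.List.slice prev none (some (i : Int))
            | none => prev)
     else a :: prev) = a :: prev.takeWhile (fun b => !(b == a)) := by
  by_cases hc : a ∈ prev
  · have hs : (PySem.List.index? prev a).isSome := by
      rw [PySem.List.index?_isSome_iff]; exact hc
    obtain ⟨i, hi⟩ := Option.isSome_iff_exists.mp hs
    obtain ⟨pre, suf, hsplit, hlen, hnot⟩ := (PySem.List.index?_eq_some_iff prev a i).1 hi
    rw [if_pos (by simpa using hc), hi]
    subst hsplit
    subst hlen
    show a :: PySem.List.slice (pre ++ a :: suf) none (some ((pre.length : Nat) : Int))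
        = a :: (pre ++ a :: suf).takeWhile (fun b => !(b == a))
    rw [PySem.List.slice_to _ (Int.natCast_nonneg _), Int.toNat_natCast]
    rw [pv_take_pre a pre suf hnot, List.take_left]
  · rw [if_neg (by simpa using hc)]
    refine congrArg _ ?_
    symm
    rw [List.takeWhile_eq_self_iff]
    intro b hb
    simp only [Bool.not_eq_eq_eq_not, Bool.not_true, beq_eq_false_iff_ne]
    intro h; subst h; exact hc hb

theorem pvDT_head (a : Int) (t : List Int) :
    pvDT [] (a :: t) = a :: (pvDT [] t).takeWhile (fun b => !(b == a)) := by
  simp [pvDT, pvDT_cons_seen]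

theorem pvB_inv (l : List Int) :
    l.foldr (fun a st => pvBStep st a) ([], []) =
      ((pvSpecList l).reverse, pvDT [] l) := by
  induction l with
  | nil => simp [pvSpecList, pvDT]
  | cons a t ih =>
    simp only [List.foldr_cons, ih]
    have hspec : pvSpecList (a :: t) = pvDT [] (a :: t) :: pvSpecList t := by
      unfold pvSpecList
      simp only [List.length_cons, List.range_succ_eq_map, List.map_cons, List.drop_zero,
        List.map_map]
      rfl
    unfold pvBStep
    simp only [hspec, pvDT_head, List.reverse_cons]
    rw [pvB_cur]

theorem pvB_eq_spec (l : List Int) : list_of_consecutive_ints_alt l = pvSpecList l := by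
  unfold list_of_consecutive_ints_alt
  rw [List.foldl_reverse, pvB_inv]
  simp

-- ===== VERDICT (by name: the statement is the Claim_ definition above) =====
theorem list_of_consecutive_ints_spec : Claim_equal_list_of_consecutive_ints := by
  intro l _
  unfold Spec_list_of_consecutive_ints
  rw [pvA_eq_spec, pvB_eq_spec]
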